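-- pv_equiv track=rewrite | github.com/yusuforzibekov/Data-Structures-and-Algorithms-Python | basic-sorting-algorithms-task-python/tasks/sorting.py | partial_selection_sort
-- ===== SOURCE A (Python) =====
-- from typing import List
--
-- def partial_selection_sort(data: List[int], k: int) -> List[int]:
--     """Returns the partially sorted array after 'k' iterations of the Selection Sort algorithm.
--     NOTE: after the first 'i' iterations - the first 'i+1' elements of the array should be ordered.
--     NOTE: 0 <= k < |data|
--     Args:
--         data: List[int], a given list of values to order.
--         k: int, the required number of selection sort iterations
--     Returns:
--         List[int], the result partially sorted array.
--     """
--     n = len(data)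
--     for i in range(k):
--         min_idx = i
--         for j in range(i + 1, n):
--             if data[j] < data[min_idx]:
--                 min_idx = j
--         data[i], data[min_idx] = data[min_idx], data[i]
--     return data
-- ===== SOURCE B (Python) =====
-- def partial_selection_sort(data, k):
--     """k iterations of selection sort, computed with a segment tree over
--     positions supporting leftmost-min queries and point updates: each round
--     pops the root minimum, moves the displaced front element into the hole,
--     and deletes the front position, so a round costs O(log n) instead of O(n).
--     NOTE: unlike A, this returns a new list instead of mutating `data`."""
--     n = len(data)
--     if k <= 0:
--         return list(data)
--     t = _build(data, 0, n)
--     out = []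
--     for i in range(k):
--         v, m = t[1] if t[0] == 'L' else t[4]   # root best: (value, position)
--         out.append(v)
--         carried = _get(t, i)                    # current front element data[i]
--         t = _update(t, m, (carried, m))         # data[m] = data[i]
--         t = _update(t, i, None)                 # position i leaves the pool
--     tail = [_get(t, p) for p in range(k, n)]
--     return out + tail
--
--
-- def _combine(a, b):
--     """Leftmost minimum of two optional (value, position) summaries."""
--     if a is None:
--         return b
--     if b is None:
--         return a
--     return a if a[0] <= b[0] else b
--
--
-- def _build(data, lo, hi):
--     """Segment tree over positions [lo, hi), hi - lo >= 1.
--     Leaf: ('L', opt)  with opt = (value, pos) or None (deleted).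
--     Node: ('N', mid, left, right, best)."""
--     if hi - lo == 1:
--         return ('L', (data[lo], lo))
--     mid = (lo + hi) // 2
--     l = _build(data, lo, mid)
--     r = _build(data, mid, hi)
--     return ('N', mid, l, r, _combine(_best(l), _best(r)))
--
--
-- def _best(t):
--     return t[1] if t[0] == 'L' else t[4]
--
--
-- def _update(t, p, opt):
--     if t[0] == 'L':
--         return ('L', opt)
--     _, mid, l, r, _ = t
--     if p < mid:
--         l = _update(l, p, opt)
--     else:
--         r = _update(r, p, opt)
--     return ('N', mid, l, r, _combine(_best(l), _best(r)))
--
--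
-- def _get(t, p):
--     """Value stored at an alive position p."""
--     while t[0] == 'N':
--         t = t[2] if p < t[1] else t[3]
--     return t[1][0]
-- ===== Notes on version B (the rewrite author's own statement) =====
-- stated objective: faster
-- what changed: Replaces the O(n) inner argmin scan of each of the k selection-sort rounds by a segment tree over positions (leftmost-range-min summaries with point updates): each round reads the root minimum, moves the displaced front element into the hole and deletes the front position in O(log n).
import Mathlib
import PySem

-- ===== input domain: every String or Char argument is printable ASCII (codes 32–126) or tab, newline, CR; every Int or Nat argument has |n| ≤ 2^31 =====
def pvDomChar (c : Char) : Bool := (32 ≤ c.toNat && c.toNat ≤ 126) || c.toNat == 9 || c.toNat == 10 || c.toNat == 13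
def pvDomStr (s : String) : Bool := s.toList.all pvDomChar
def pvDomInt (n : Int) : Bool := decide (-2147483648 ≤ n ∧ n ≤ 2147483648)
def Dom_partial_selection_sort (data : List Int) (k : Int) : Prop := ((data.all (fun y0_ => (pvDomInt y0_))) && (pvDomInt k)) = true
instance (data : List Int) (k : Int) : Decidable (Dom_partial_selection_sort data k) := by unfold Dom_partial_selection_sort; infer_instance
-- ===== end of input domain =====

-- B replaces each O(n) inner argmin scan of A's k selection-sort rounds by a segment tree
-- over positions (leftmost-min summaries, point updates), making a round O(log n).
-- A mutates `data` in place; B does not — the equivalence proved here is about the RETURN value only.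

-- ===== PORT A =====
-- body of A's outer loop (i runs over range(k)); n is len(data), constant through the loop
def pvStepA (n : Int) (d : List Int) (i : Int) : List Int :=
  let minIdx := (PySem.List.pyRange (i + 1) n 1).foldl
    (fun m j => if PySem.List.pyGetD d j 0 < PySem.List.pyGetD d m 0 then j else m) i
  -- data[i], data[min_idx] = data[min_idx], data[i]  (RHS read first)
  let dm := PySem.List.pyGetD d minIdx 0
  let di := PySem.List.pyGetD d i 0
  PySem.List.pySetD (PySem.List.pySetD d i dm) minIdx di

def partial_selection_sort (data : List Int) (k : Int) : List Int :=
  let n : Int := data.length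
  (PySem.List.pyRange 0 k 1).foldl (pvStepA n) data

-- ===== PORT B =====
-- the tagged tuples of Source B as an inductive: ('L', opt) / ('N', mid, left, right, best)
inductive PvTree where
  | leaf : Option (Int × Int) → PvTree
  | node : Int → PvTree → PvTree → Option (Int × Int) → PvTree
deriving Repr

-- _combine: leftmost minimum of two optional (value, position) summaries
def pvComb (a b : Option (Int × Int)) : Option (Int × Int) :=
  match a, b with
  | none, b => b
  | some x, none => some x
  | some x, some y => if x.1 ≤ y.1 then some x else some y

-- _best
def pvBest : PvTree → Option (Int × Int)
  | .leaf o => o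
  | .node _ _ _ b => b

-- _build (Python's `hi - lo == 1` leaf test is widened to `≤ 1` only to make the
-- recursion total; on the admitted inputs every call has 1 ≤ hi - lo, so it is the same test)
def pvBuild (data : List Int) (lo hi : Int) : PvTree :=
  if hi - lo ≤ 1 then .leaf (some (PySem.List.pyGetD data lo 0, lo))
  else
    let mid := PySem.Int.floordiv (lo + hi) 2
    let l := pvBuild data lo mid
    let r := pvBuild data mid hi
    .node mid l r (pvComb (pvBest l) (pvBest r))
termination_by (hi - lo).toNat
decreasing_by
  · have h1 := (PySem.Int.le_floordiv_iff_mul_le (a := lo + hi) (q := lo + 1) (by omega : (0:Int) < 2)).mpr (by omega)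
    have h2 := (PySem.Int.floordiv_lt_iff_lt_mul (a := lo + hi) (q := hi) (by omega : (0:Int) < 2)).mpr (by omega)
    omega
  · have h1 := (PySem.Int.le_floordiv_iff_mul_le (a := lo + hi) (q := lo + 1) (by omega : (0:Int) < 2)).mpr (by omega)
    have h2 := (PySem.Int.floordiv_lt_iff_lt_mul (a := lo + hi) (q := hi) (by omega : (0:Int) < 2)).mpr (by omega)
    omega

-- _update
def pvUpdate : PvTree → Int → Option (Int × Int) → PvTree
  | .leaf _, _, o => .leaf o
  | .node mid l r _, p, o =>
    if p < mid then
      let l' := pvUpdate l p o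
      .node mid l' r (pvComb (pvBest l') (pvBest r))
    else
      let r' := pvUpdate r p o
      .node mid l r' (pvComb (pvBest l) (pvBest r'))

-- _get (only called on alive positions; the getD default is never read there)
def pvGetT : PvTree → Int → Int
  | .leaf o, _ => (o.getD (0, 0)).1
  | .node mid l r _, p => if p < mid then pvGetT l p else pvGetT r p

-- body of B's main loop (i runs over range(k))
def pvStepB (s : List Int × PvTree) (i : Int) : List Int × PvTree :=
  let b := (pvBest s.2).getD (0, 0)        -- root best (v, m); not None on admitted inputs
  let out := s.1 ++ [b.1]
  let carried := pvGetT s.2 i              -- current front element data[i]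
  let t1 := pvUpdate s.2 b.2 (some (carried, b.2))
  let t2 := pvUpdate t1 i none
  (out, t2)

def partial_selection_sort_alt (data : List Int) (k : Int) : List Int :=
  let n : Int := data.length
  if k ≤ 0 then data
  else
    let st := (PySem.List.pyRange 0 k 1).foldl pvStepB ([], pvBuild data 0 n)
    st.1 ++ (PySem.List.pyRange k n 1).map (fun p => pvGetT st.2 p)

-- ===== PRECONDITION & SPEC =====
-- Pre_ excludes k > len(data): there Python A raises IndexError (and B's tree holds no k-th minimum).
def Pre_partial_selection_sort (data : List Int) (k : Int) : Prop := k ≤ (data.length : Int)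
instance (data : List Int) (k : Int) : Decidable (Pre_partial_selection_sort data k) := by
  unfold Pre_partial_selection_sort; infer_instance

def pvWitness_partial_selection_sort : List Int × Int := ([3, 1, 2, 0], 2)

def Spec_partial_selection_sort (data : List Int) (k : Int) (out : List Int) : Prop := out = partial_selection_sort_alt data k
instance (data : List Int) (k : Int) (out : List Int) : Decidable (Spec_partial_selection_sort data k out) := by unfold Spec_partial_selection_sort; infer_instance

-- ===== CLAIM (what is proved, stated in full; the proofs are below) =====
def Claim_equal_partial_selection_sort : Prop := ∀ (data : List Int) (k : Int), Dom_partial_selection_sort data k → Pre_partial_selection_sort data k → Spec_partial_selection_sort data k (partial_selection_sort data k)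

-- ===== LEMMAS AND PROOFS =====

-- leftmost argmin (index, value) of the nonempty list x :: xs
def pvLmv : Int → List Int → Nat × Int
  | x, [] => (0, x)
  | x, y :: ys => let p := pvLmv y ys; if p.2 < x then (p.1 + 1, p.2) else (0, x)

-- the common reference: k rounds of leftmost-min extraction
def pvR : Nat → List Int → List Int
  | 0, t => t
  | _ + 1, [] => []
  | k + 1, x :: xs =>
    let p := pvLmv x xs
    p.2 :: pvR k (if p.1 = 0 then xs else xs.set (p.1 - 1) x)

theorem pvLmv_snd_le (xs : List Int) (x : Int) : (pvLmv x xs).2 ≤ x := by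
  cases xs with
  | nil => simp [pvLmv]
  | cons y ys =>
    simp only [pvLmv]
    split
    next h => simpa using le_of_lt h
    next h => simp

theorem pvLmv_fst_le (xs : List Int) : ∀ x, (pvLmv x xs).1 ≤ xs.length := by
  induction xs with
  | nil => intro x; simp [pvLmv]
  | cons y ys ih =>
    intro x
    simp only [pvLmv, List.length_cons]
    split
    next h => simpa using Nat.succ_le_succ (ih y)
    next h => simp

theorem pvLmv_getElem? (xs : List Int) : ∀ x, (x :: xs)[(pvLmv x xs).1]? = some (pvLmv x xs).2 := by
  induction xs with
  | nil => intro x; simp [pvLmv]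
  | cons y ys ih =>
    intro x
    simp only [pvLmv]
    rcases lt_or_ge (pvLmv y ys).2 x with h | h
    · simpa [if_pos h] using ih y
    · simp [not_lt.mpr h]

theorem pvLmv_fst_zero (xs : List Int) (x : Int) (h : (pvLmv x xs).1 = 0) : (pvLmv x xs).2 = x := by
  cases xs with
  | nil => simp [pvLmv]
  | cons y ys =>
    by_cases hc : (pvLmv y ys).2 < x
    · simp [pvLmv, hc] at h
    · simp [pvLmv, hc]

-- indexing at `a` reads the head of the dropped tail
theorem pv_pyGetD_drop (d : List Int) (a : Int) (x : Int) (xs : List Int)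
    (ha : 0 ≤ a) (hd : d.drop a.toNat = x :: xs) :
    PySem.List.pyGetD d a 0 = x := by
  have hlt : a.toNat < d.length := by
    by_contra h
    rw [List.drop_eq_nil_of_le (Nat.le_of_not_lt h)] at hd
    simp at hd
  rw [PySem.List.pyGetD_eq_getElem d 0 ha (by omega)]
  have h0 : (d.drop a.toNat)[0]'(by simp [hd]) = x := by simp [hd]
  rw [List.getElem_drop] at h0
  simpa using h0

-- the inner argmin scan of A, characterised against the unscanned suffix x :: xs
theorem pv_inner_fold (d : List Int) :
    ∀ (xs : List Int) (x a b vb : Int),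
    0 ≤ a → d.drop a.toNat = x :: xs → 0 ≤ b → b < a → PySem.List.pyGetD d b 0 = vb →
    (PySem.List.pyRange a d.length 1).foldl
      (fun m j => if PySem.List.pyGetD d j 0 < PySem.List.pyGetD d m 0 then j else m) b =
    (if (pvLmv x xs).2 < vb then a + ((pvLmv x xs).1 : Int) else b) := by
  intro xs
  induction xs with
  | nil =>
    intro x a b vb ha hdrop hb hba hvb
    have hlen : (d.length : Int) = a + 1 := by
      have h1 := congrArg List.length hdrop
      simp [List.length_drop] at h1
      omega
    have hlt : a < (d.length : Int) := by omega
    have hdx := pv_pyGetD_drop d a x [] ha hdrop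
    rw [PySem.List.pyRange_one_cons hlt, hlen, PySem.List.pyRange_one_eq_nil (by omega)]
    simp only [List.foldl_cons, List.foldl_nil, hdx, hvb, pvLmv]
    split_ifs <;> omega
  | cons y ys ih =>
    intro x a b vb ha hdrop hb hba hvb
    have hlt : a < (d.length : Int) := by
      have h1 := congrArg List.length hdrop
      simp [List.length_drop] at h1
      omega
    have hdx := pv_pyGetD_drop d a x (y :: ys) ha hdrop
    have hdrop' : d.drop (a + 1).toNat = y :: ys := by
      have h2 := congrArg (List.drop 1) hdrop
      simp only [List.drop_drop, List.drop_succ_cons, List.drop_zero] at h2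
      convert h2 using 2
      omega
    rw [PySem.List.pyRange_one_cons hlt, List.foldl_cons]
    have hstep : (if PySem.List.pyGetD d a 0 < PySem.List.pyGetD d b 0 then a else b)
        = (if x < vb then a else b) := by rw [hdx, hvb]
    rw [hstep]
    have hle := pvLmv_snd_le ys y
    rcases lt_or_ge x vb with hxv | hxv
    · rw [if_pos hxv, ih y (a + 1) a x (by omega) hdrop' (by omega) (by omega) hdx]
      rcases lt_or_ge (pvLmv y ys).2 x with h1 | h1
      · have h2 : (pvLmv y ys).2 < vb := lt_trans h1 hxv
        simp only [pvLmv, if_pos h1, if_pos h2]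
        push_cast
        ring
      · simp only [pvLmv, if_neg (not_lt.mpr h1), if_pos hxv]
        simp
    · rw [if_neg (not_lt.mpr hxv), ih y (a + 1) b vb (by omega) hdrop' hb (by omega) hvb]
      rcases lt_or_ge (pvLmv y ys).2 x with h1 | h1
      · simp only [pvLmv, if_pos h1]
        rcases lt_or_ge (pvLmv y ys).2 vb with h3 | h3
        · simp only [if_pos h3]
          push_cast
          ring
        · simp only [if_neg (not_lt.mpr h3)]
      · have h4 : ¬ x < vb := not_lt.mpr hxv
        simp only [pvLmv, if_neg (not_lt.mpr h1), if_neg h4]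
        have h5 : ¬ (pvLmv y ys).2 < vb := by omega
        simp only [if_neg h5]

-- one outer iteration of A, on the split state out ++ x :: xs at position |out|
theorem pvStepA_eq (n : Int) (out : List Int) (x : Int) (xs : List Int)
    (hn : n = (out.length : Int) + (x :: xs).length) :
    pvStepA n (out ++ x :: xs) (out.length : Int) =
      (out ++ [(pvLmv x xs).2]) ++
        (if (pvLmv x xs).1 = 0 then xs else xs.set ((pvLmv x xs).1 - 1) x) := by
  have hd : (out ++ x :: xs).drop ((out.length : Int) + 1).toNat = xs := by
    have h2 : ((out.length : Int) + 1).toNat = out.length + 1 := by omega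
    rw [h2]
    rw [show out.length + 1 = 1 + out.length from by omega, ← List.drop_drop]
    simp
  have hdi : PySem.List.pyGetD (out ++ x :: xs) (out.length : Int) 0 = x := by
    apply pv_pyGetD_drop _ _ _ xs (by omega)
    simp
  have hfst := pvLmv_fst_le xs x
  have hmin : (PySem.List.pyRange ((out.length : Int) + 1) ((out ++ x :: xs).length : Int) 1).foldl
      (fun m j => if PySem.List.pyGetD (out ++ x :: xs) j 0 < PySem.List.pyGetD (out ++ x :: xs) m 0 then j else m)
      (out.length : Int) = (out.length : Int) + ((pvLmv x xs).1 : Int) := by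
    cases xs with
    | nil =>
      have hlen : ((out ++ [x]).length : Int) = (out.length : Int) + 1 := by simp
      rw [hlen, PySem.List.pyRange_one_eq_nil (by omega)]
      simp [pvLmv]
    | cons y ys =>
      rw [pv_inner_fold (out ++ x :: y :: ys) ys y ((out.length : Int) + 1) (out.length : Int) x
        (by omega) hd (by omega) (by omega) hdi]
      have hle := pvLmv_snd_le ys y
      rcases lt_or_ge (pvLmv y ys).2 x with h1 | h1
      · simp only [pvLmv, if_pos h1]
        push_cast
        ring
      · simp only [pvLmv, if_neg (not_lt.mpr h1)]
        simp
  have hdm : PySem.List.pyGetD (out ++ x :: xs) ((out.length : Int) + ((pvLmv x xs).1 : Int)) 0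
      = (pvLmv x xs).2 := by
    have hget := pvLmv_getElem? xs x
    have hlt : (pvLmv x xs).1 < (x :: xs).length := by simp; omega
    rw [show ((out.length : Int) + ((pvLmv x xs).1 : Int))
        = ((out.length + (pvLmv x xs).1 : Nat) : Int) from by push_cast; ring]
    rw [PySem.List.pyGetD_natCast]
    rw [List.getD_eq_getElem _ _ (by simp; omega)]
    rw [List.getElem_append_right (by omega)]
    simp only [Nat.add_sub_cancel_left]
    rw [List.getElem?_eq_getElem hlt] at hget
    exact Option.some.inj hget
  have hn' : n = ((out ++ x :: xs).length : Int) := by simp at hn ⊢; omega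
  subst hn'
  simp only [pvStepA]
  rw [hmin, hdm, hdi]
  have hc1 : PySem.List.pySetD (out ++ x :: xs) (out.length : Int) (pvLmv x xs).2
      = out ++ (pvLmv x xs).2 :: xs := by
    rw [PySem.List.pySetD_natCast, List.set_append]
    simp
  rw [hc1]
  have hc2 : ((out.length : Int) + ((pvLmv x xs).1 : Int)) = ((out.length + (pvLmv x xs).1 : Nat) : Int) := by
    push_cast
    ring
  rw [hc2, PySem.List.pySetD_natCast, List.set_append]
  rw [if_neg (by omega)]
  simp only [Nat.add_sub_cancel_left]
  cases hp : (pvLmv x xs).1 with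
  | zero =>
    have hv := pvLmv_fst_zero xs x hp
    simp [hv]
  | succ q =>
    simp [List.set_cons_succ]

theorem pvAfold (m : Nat) : ∀ (n k : Int) (out t : List Int),
    m = (k - out.length).toNat → n = (out.length : Int) + t.length → k ≤ n →
    (PySem.List.pyRange (out.length : Int) k 1).foldl (pvStepA n) (out ++ t) =
      out ++ pvR (k - (out.length : Int)).toNat t := by
  induction m with
  | zero =>
    intro n k out t hm hn hk
    have hke : k ≤ (out.length : Int) := by omega
    rw [PySem.List.pyRange_one_eq_nil hke, ← hm]
    simp [pvR]
  | succ m ih =>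
    intro n k out t hm hn hk
    have hck : (out.length : Int) < k := by omega
    cases t with
    | nil =>
      exfalso
      simp at hn
      omega
    | cons x xs =>
      rw [PySem.List.pyRange_one_cons hck, List.foldl_cons]
      have hn' : n = ((out ++ x :: xs).length : Int) := by simp at hn ⊢; omega
      subst hn'
      rw [pvStepA_eq _ out x xs (by simp)]
      have hlen : ((out ++ [(pvLmv x xs).2]).length : Int) = (out.length : Int) + 1 := by simp
      have hlent' : ((if (pvLmv x xs).1 = 0 then xs else xs.set ((pvLmv x xs).1 - 1) x).length : Int)
          = (xs.length : Int) := by split <;> simp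
      have hlc : (((out ++ x :: xs).length : Nat) : Int) = (out.length : Int) + (xs.length : Int) + 1 := by
        push_cast [List.length_append, List.length_cons]
        ring
      rw [show ((out.length : Int) + 1) = ((out ++ [(pvLmv x xs).2]).length : Int) from hlen.symm]
      rw [ih ((out ++ x :: xs).length : Int) k (out ++ [(pvLmv x xs).2]) _
        (by omega) (by omega) hk]
      have h1 : (k - ((out.length : Nat) : Int)).toNat
          = (k - (((out ++ [(pvLmv x xs).2]).length : Nat) : Int)).toNat + 1 := by omega
      rw [h1]
      simp only [pvR, List.append_assoc, List.cons_append, List.nil_append]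

-- ===== B-side lemmas: the segment tree computes leftmost-min of what its leaves hold =====

-- well-formedness: t covers [lo, hi), leaf at p holds f p, every node best is the combine of its children
inductive PvWf : PvTree → Int → Int → (Int → Option (Int × Int)) → Prop where
  | leaf : ∀ (lo hi : Int) (f : Int → Option (Int × Int)), lo + 1 = hi →
      PvWf (.leaf (f lo)) lo hi f
  | node : ∀ (lo mid hi : Int) (f : Int → Option (Int × Int)) (l r : PvTree),
      lo < mid → mid < hi → PvWf l lo mid f → PvWf r mid hi f →
      PvWf (.node mid l r (pvComb (pvBest l) (pvBest r))) lo hi f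

theorem pvComb_none_right (a : Option (Int × Int)) : pvComb a none = a := by
  cases a <;> rfl

theorem pvComb_assoc (a b c : Option (Int × Int)) :
    pvComb (pvComb a b) c = pvComb a (pvComb b c) := by
  cases a <;> cases b <;> cases c <;> simp only [pvComb] <;> split_ifs <;>
    first | rfl | (exfalso; omega) | (simp only [pvComb]; split_ifs <;> first | rfl | (exfalso; omega))

-- the combined summary of f over [lo, hi)
def pvCombAll (lo hi : Int) (f : Int → Option (Int × Int)) : Option (Int × Int) :=
  (PySem.List.pyRange lo hi 1).foldl (fun a p => pvComb a (f p)) none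

theorem pv_foldl_comb_shift (f : Int → Option (Int × Int)) (l : List Int) :
    ∀ a, l.foldl (fun acc p => pvComb acc (f p)) a
      = pvComb a (l.foldl (fun acc p => pvComb acc (f p)) none) := by
  induction l with
  | nil => intro a; rw [List.foldl_nil, List.foldl_nil, pvComb_none_right]
  | cons x l ih =>
    intro a
    rw [List.foldl_cons, List.foldl_cons, ih (pvComb a (f x)), ih (pvComb none (f x)),
      pvComb_assoc]
    rfl

theorem pvCombAll_split (lo mid hi : Int) (f : Int → Option (Int × Int))
    (h1 : lo ≤ mid) (h2 : mid ≤ hi) :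
    pvCombAll lo hi f = pvComb (pvCombAll lo mid f) (pvCombAll mid hi f) := by
  unfold pvCombAll
  rw [PySem.List.pyRange_one_append lo mid hi h1 h2, List.foldl_append, pv_foldl_comb_shift]

theorem pvBest_wf {t : PvTree} {lo hi : Int} {f : Int → Option (Int × Int)}
    (h : PvWf t lo hi f) : pvBest t = pvCombAll lo hi f := by
  induction h with
  | leaf lo hi f h1 =>
    unfold pvCombAll
    rw [← h1, PySem.List.pyRange_one_singleton]
    rfl
  | node lo mid hi f l r h1 h2 hl hr ihl ihr =>
    rw [pvCombAll_split lo mid hi f (by omega) (by omega), ← ihl, ← ihr]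
    rfl

theorem pvWf_congr {t : PvTree} {lo hi : Int} {f g : Int → Option (Int × Int)}
    (h : PvWf t lo hi f) (hfg : ∀ p, lo ≤ p → p < hi → f p = g p) : PvWf t lo hi g := by
  induction h with
  | leaf lo hi f h1 =>
    rw [hfg lo (le_refl lo) (by omega)]
    exact PvWf.leaf lo hi g h1
  | node lo mid hi f l r h1 h2 hl hr ihl ihr =>
    exact PvWf.node lo mid hi g l r h1 h2
      (ihl (fun p hp1 hp2 => hfg p hp1 (by omega)))
      (ihr (fun p hp1 hp2 => hfg p (by omega) hp2))

theorem pvBuild_wf (data : List Int) : ∀ (m : Nat) (lo hi : Int), (hi - lo).toNat = m →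
    1 ≤ hi - lo →
    PvWf (pvBuild data lo hi) lo hi (fun p => some (PySem.List.pyGetD data p 0, p)) := by
  intro m
  induction m using Nat.strong_induction_on with
  | _ m ih =>
    intro lo hi hm h1
    unfold pvBuild
    by_cases hc : hi - lo ≤ 1
    · rw [if_pos hc]
      exact PvWf.leaf lo hi (fun p => some (PySem.List.pyGetD data p 0, p)) (by omega)
    · rw [if_neg hc]
      have hmid1 := (PySem.Int.le_floordiv_iff_mul_le (a := lo + hi) (q := lo + 1)
        (by omega : (0:Int) < 2)).mpr (by omega)
      have hmid2 := (PySem.Int.floordiv_lt_iff_lt_mul (a := lo + hi) (q := hi)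
        (by omega : (0:Int) < 2)).mpr (by omega)
      exact PvWf.node lo _ hi _ _ _ (by omega) (by omega)
        (ih _ (by omega) lo _ rfl (by omega))
        (ih _ (by omega) _ hi rfl (by omega))

theorem pvUpdate_wf {t : PvTree} {lo hi : Int} {f : Int → Option (Int × Int)}
    (h : PvWf t lo hi f) : ∀ (p : Int) (o : Option (Int × Int)), lo ≤ p → p < hi →
    PvWf (pvUpdate t p o) lo hi (Function.update f p o) := by
  induction h with
  | leaf lo hi f h1 =>
    intro p o hp1 hp2
    have hpl : p = lo := by omega
    subst hpl
    have h3 := PvWf.leaf p hi (Function.update f p o) h1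
    rw [Function.update_self] at h3
    exact h3
  | node lo mid hi f l r h1 h2 hl hr ihl ihr =>
    intro p o hp1 hp2
    by_cases hpm : p < mid
    · have : pvUpdate (.node mid l r (pvComb (pvBest l) (pvBest r))) p o
          = .node mid (pvUpdate l p o) r (pvComb (pvBest (pvUpdate l p o)) (pvBest r)) := by
        simp [pvUpdate, hpm]
      rw [this]
      exact PvWf.node lo mid hi _ _ _ h1 h2 (ihl p o hp1 hpm)
        (pvWf_congr hr (fun q hq1 _ => by
          rw [Function.update_of_ne (by omega)]))
    · have : pvUpdate (.node mid l r (pvComb (pvBest l) (pvBest r))) p o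
          = .node mid l (pvUpdate r p o) (pvComb (pvBest l) (pvBest (pvUpdate r p o))) := by
        simp [pvUpdate, hpm]
      rw [this]
      exact PvWf.node lo mid hi _ _ _ h1 h2
        (pvWf_congr hl (fun q hq1 hq2 => by
          rw [Function.update_of_ne (by omega)]))
        (ihr p o (by omega) hp2)

theorem pvGetT_wf {t : PvTree} {lo hi : Int} {f : Int → Option (Int × Int)}
    (h : PvWf t lo hi f) : ∀ (p : Int) (v q : Int), lo ≤ p → p < hi → f p = some (v, q) →
    pvGetT t p = v := by
  induction h with
  | leaf lo hi f h1 =>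
    intro p v q hp1 hp2 hfp
    have hpl : p = lo := by omega
    subst hpl
    simp [pvGetT, hfp]
  | node lo mid hi f l r h1 h2 hl hr ihl ihr =>
    intro p v q hp1 hp2 hfp
    by_cases hpm : p < mid
    · simpa [pvGetT, hpm] using ihl p v q hp1 hpm hfp
    · simpa [pvGetT, hpm] using ihr p v q (by omega) hp2 hfp

-- the leaf contents during round i: positions < i deleted, position p ≥ i holds suffix[p-i]
def pvF (i : Int) (s : List Int) : Int → Option (Int × Int) :=
  fun p => if p < i then none else some (s.getD (p - i).toNat 0, p)

theorem pvCombAll_none (lo hi : Int) (f : Int → Option (Int × Int))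
    (h : ∀ p, lo ≤ p → p < hi → f p = none) : pvCombAll lo hi f = none := by
  unfold pvCombAll
  rw [PySem.List.foldl_congr_mem _ _ (fun a _ => a) none
    (fun acc x hx => by
      rw [(PySem.List.mem_pyRange_one).mp hx |>.1 |> (fun h1 => h x h1 ((PySem.List.mem_pyRange_one).mp hx).2), pvComb_none_right])]
  simp

-- the combined summary of the alive suffix is its leftmost minimum with its position
theorem pvCombAll_suffix : ∀ (xs : List Int) (x : Int) (i : Int),
    pvCombAll i (i + ((x :: xs).length : Int)) (pvF i (x :: xs))
      = some ((pvLmv x xs).2, i + ((pvLmv x xs).1 : Int)) := by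
  intro xs
  induction xs with
  | nil =>
    intro x i
    unfold pvCombAll
    rw [show i + (([x] : List Int).length : Int) = i + 1 by simp,
      PySem.List.pyRange_one_singleton]
    simp [pvF, pvLmv, pvComb]
  | cons y ys ih =>
    intro x i
    have hsplit := pvCombAll_split i (i + 1) (i + ((x :: y :: ys).length : Int))
      (pvF i (x :: y :: ys)) (by omega) (by simp; omega)
    rw [hsplit]
    have h1 : pvCombAll i (i + 1) (pvF i (x :: y :: ys)) = some (x, i) := by
      unfold pvCombAll
      rw [PySem.List.pyRange_one_singleton]
      simp [pvF, pvComb]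
    have hcongr : pvCombAll (i + 1) (i + ((x :: y :: ys).length : Int)) (pvF i (x :: y :: ys))
        = pvCombAll (i + 1) ((i + 1) + ((y :: ys).length : Int)) (pvF (i + 1) (y :: ys)) := by
      unfold pvCombAll
      rw [show i + ((x :: y :: ys).length : Int) = (i + 1) + ((y :: ys).length : Int) by
        simp; ring]
      apply PySem.List.foldl_congr_mem
      intro acc p hp
      have hp' := (PySem.List.mem_pyRange_one).mp hp
      have : pvF i (x :: y :: ys) p = pvF (i + 1) (y :: ys) p := by
        unfold pvF
        rw [if_neg (by omega), if_neg (by omega)]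
        have hidx : (p - i).toNat = (p - (i + 1)).toNat + 1 := by omega
        rw [hidx]
        rfl
      rw [this]
    rw [hcongr, ih y (i + 1), h1]
    simp only [pvLmv]
    rcases lt_or_ge (pvLmv y ys).2 x with h | h
    · rw [if_pos h]
      simp only [pvComb, if_neg (by omega : ¬ x ≤ (pvLmv y ys).2)]
      push_cast
      ring_nf
    · rw [if_neg (not_lt.mpr h)]
      simp only [pvComb, if_pos h]
      simp

-- reading the tail positions [k, n) back out of the tree yields the suffix list
theorem pvReadTail : ∀ (s : List Int) (kk n : Int) (t : PvTree) (f : Int → Option (Int × Int)),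
    0 ≤ kk → kk + (s.length : Int) = n → PvWf t 0 n f →
    (∀ p, kk ≤ p → p < n → f p = some (s.getD (p - kk).toNat 0, p)) →
    (PySem.List.pyRange kk n 1).map (fun p => pvGetT t p) = s := by
  intro s
  induction s with
  | nil =>
    intro kk n t f hkk hlen hwf hf
    rw [PySem.List.pyRange_one_eq_nil (by simp at hlen; omega)]
    rfl
  | cons x xs ih =>
    intro kk n t f hkk hlen hwf hf
    have hkn : kk < n := by simp at hlen; omega
    rw [PySem.List.pyRange_one_cons hkn, List.map_cons]
    have hhead : pvGetT t kk = x := by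
      apply pvGetT_wf hwf kk x kk hkk hkn
      rw [hf kk (le_refl kk) hkn]
      simp
    rw [hhead]
    congr 1
    apply ih (kk + 1) n t f (by omega) (by simp at hlen ⊢; omega) hwf
    intro p hp1 hp2
    rw [hf p (by omega) hp2]
    have hidx : (p - kk).toNat = (p - (kk + 1)).toNat + 1 := by omega
    rw [hidx]
    rfl

-- one round of B, in terms of the reference state (i, suffix)
theorem pvStepB_wf (i n : Int) (x : Int) (xs : List Int) (out : List Int) (t : PvTree)
    (hi : 0 ≤ i) (hn : i + ((x :: xs).length : Int) = n)
    (hwf : PvWf t 0 n (pvF i (x :: xs))) :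
    (pvStepB (out, t) i).1 = out ++ [(pvLmv x xs).2] ∧
    PvWf (pvStepB (out, t) i).2 0 n
      (pvF (i + 1) (if (pvLmv x xs).1 = 0 then xs else xs.set ((pvLmv x xs).1 - 1) x)) := by
  have hq := pvLmv_fst_le xs x
  have hlen : n = i + (xs.length : Int) + 1 := by simp at hn; omega
  have hbest : pvBest t = some ((pvLmv x xs).2, i + ((pvLmv x xs).1 : Int)) := by
    rw [pvBest_wf hwf, pvCombAll_split 0 i n _ hi (by omega),
      pvCombAll_none 0 i _ (fun p hp1 hp2 => by unfold pvF; rw [if_pos hp2]),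
      show n = i + (((x :: xs).length : Nat) : Int) from hn.symm, pvCombAll_suffix]
    rfl
  have hget : pvGetT t i = x := by
    apply pvGetT_wf hwf i x i hi (by omega)
    unfold pvF
    simp
  have hstep : pvStepB (out, t) i =
      (out ++ [(pvLmv x xs).2],
       pvUpdate (pvUpdate t (i + ((pvLmv x xs).1 : Int))
         (some (x, i + ((pvLmv x xs).1 : Int)))) i none) := by
    simp only [pvStepB, hbest, hget]
    rfl
  rw [hstep]
  refine ⟨rfl, ?_⟩
  apply pvWf_congr
    (pvUpdate_wf (pvUpdate_wf hwf (i + ((pvLmv x xs).1 : Int))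
      (some (x, i + ((pvLmv x xs).1 : Int))) (by omega) (by omega)) i none hi (by omega))
  intro p hp1 hp2
  by_cases hpi : p = i
  · subst hpi
    rw [Function.update_self]
    unfold pvF
    rw [if_pos (by omega)]
  · rw [Function.update_of_ne hpi]
    by_cases hpm : p = i + ((pvLmv x xs).1 : Int)
    · have hq1 : (pvLmv x xs).1 ≠ 0 := by
        intro h0
        rw [h0] at hpm
        simp at hpm
        omega
      subst hpm
      rw [Function.update_self]
      unfold pvF
      rw [if_neg (by omega), if_neg hq1]
      have hidx : ((i + ((pvLmv x xs).1 : Int)) - (i + 1)).toNat = (pvLmv x xs).1 - 1 := by omega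
      rw [hidx]
      have hbnd : (pvLmv x xs).1 - 1 < xs.length := by omega
      rw [List.getD_eq_getElem _ _ (by simpa using hbnd), List.getElem_set_self]
    · rw [Function.update_of_ne hpm]
      unfold pvF
      by_cases hplt : p < i
      · rw [if_pos hplt, if_pos (by omega)]
      · rw [if_neg hplt, if_neg (by omega)]
        have hidx : (p - i).toNat = (p - (i + 1)).toNat + 1 := by omega
        rw [hidx]
        have hbnd : (p - (i + 1)).toNat < xs.length := by omega
        rw [show ((x :: xs).getD ((p - (i + 1)).toNat + 1) 0) = xs.getD (p - (i + 1)).toNat 0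
          from rfl]
        congr 2
        split
        · rfl
        · next hq0 =>
          rw [List.getD_eq_getElem _ _ hbnd,
            List.getD_eq_getElem _ _ (by simpa using hbnd),
            List.getElem_set_ne (by omega)]

-- the main loop of B; reads out ++ (extraction of j rounds)
theorem pvBloop : ∀ (j : Nat) (i kk n : Int) (out s : List Int) (t : PvTree),
    j = (kk - i).toNat → 0 ≤ i → i ≤ kk → kk ≤ n → i + (s.length : Int) = n →
    PvWf t 0 n (pvF i s) →
    (let st := (PySem.List.pyRange i kk 1).foldl pvStepB (out, t)
     st.1 ++ (PySem.List.pyRange kk n 1).map (fun p => pvGetT st.2 p)) = out ++ pvR j s := by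
  intro j
  induction j with
  | zero =>
    intro i kk n out s t hj hi hik hkn hlen hwf
    have hki : kk = i := by omega
    subst hki
    rw [PySem.List.pyRange_one_eq_nil (le_refl kk)]
    simp only [List.foldl_nil, pvR]
    congr 1
    apply pvReadTail s kk n t (pvF kk s) (by omega) hlen hwf
    intro p hp1 hp2
    unfold pvF
    rw [if_neg (by omega)]
  | succ j ihj =>
    intro i kk n out s t hj hi hik hkn hlen hwf
    have hik' : i < kk := by omega
    cases s with
    | nil =>
      exfalso
      simp at hlen
      omega
    | cons x xs =>
      rw [PySem.List.pyRange_one_cons hik', List.foldl_cons]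
      obtain ⟨h1, h2⟩ := pvStepB_wf i n x xs out t hi hlen hwf
      have hrw : pvStepB (out, t) i = ((pvStepB (out, t) i).1, (pvStepB (out, t) i).2) := rfl
      rw [hrw, h1]
      rw [ihj (i + 1) kk n (out ++ [(pvLmv x xs).2]) _ _ (by omega) (by omega) (by omega) hkn
        (by split <;> (simp at hlen ⊢; omega)) h2]
      simp only [pvR, List.append_assoc, List.cons_append, List.nil_append]

-- ===== VERDICT (by name: the statement is the Claim_ definition above) =====
theorem partial_selection_sort_spec : Claim_equal_partial_selection_sort := by
  unfold Claim_equal_partial_selection_sort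
  intro data k _ hpre
  unfold Pre_partial_selection_sort at hpre
  unfold Spec_partial_selection_sort
  simp only [partial_selection_sort, partial_selection_sort_alt]
  by_cases hk : k ≤ 0
  · rw [if_pos hk, PySem.List.pyRange_one_eq_nil hk]
    simp
  · rw [if_neg hk]
    have hA := pvAfold (k - (([] : List Int).length : Int)).toNat (data.length : Int) k [] data
      rfl (by simp) hpre
    simp only [List.length_nil, Int.natCast_zero, List.nil_append, Int.sub_zero] at hA
    rw [hA]
    have hwf0 : PvWf (pvBuild data 0 (data.length : Int)) 0 (data.length : Int) (pvF 0 data) := by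
      apply pvWf_congr (pvBuild_wf data data.length 0 (data.length : Int) (by omega)
        (by omega))
      intro p hp1 hp2
      unfold pvF
      rw [if_neg (by omega), PySem.List.pyGetD_of_nonneg data 0 hp1]
      simp
    have hB := pvBloop k.toNat 0 k (data.length : Int) [] data (pvBuild data 0 (data.length : Int))
      (by omega) (le_refl 0) (by omega) hpre (by simp) hwf0
    simp only [List.nil_append] at hB
    exact hB.symm
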